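-- pv_equiv track=rewrite | github.com/Hyiism/ChinaVis2024 | backend/student_title_process_cal.py | adjust_time_list
-- ===== SOURCE A (Python) =====
-- def adjust_time_list(start_idx, lst):
--     # 找到第一个差值大于5400的位置,一个半小时
--     next_start_index = None
--     for i in range(start_idx + 1, len(lst)):
--         if lst[i] - lst[i - 1] > 5400:  # 认为他在休息
--             next_start_index = i
--             break
--
--     # 如果没有找到这样的差值，处理完成
--     if next_start_index is None:
--         return lst
--
--     # 处理当前段的时间
--     base_time = lst[next_start_index]
--     adjusted_times = [time - base_time for time in lst[next_start_index:]]
--     adjusted_times = [time + 300 + lst[next_start_index - 1] for time in adjusted_times]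
--
--     # 合并结果并递归处理
--     new_list = lst[:next_start_index] + adjusted_times
--     return adjust_time_list(next_start_index, new_list)
-- ===== SOURCE B (Python) =====
-- def adjust_time_list(start_idx, lst):
--     # Single pass: keep a cumulative offset; each gap > 5400 shrinks to 300.
--     k = start_idx + 1
--     res = lst[:k]
--     offset = 0
--     for prev, cur in zip(lst[k - 1:], lst[k:]):
--         if cur - prev > 5400:
--             offset += cur - prev - 300
--         res.append(cur - offset)
--     return res
-- ===== Notes on version B (the rewrite author's own statement) =====
-- stated objective: faster
-- what changed: Replaced the recursive find-first-gap-then-slice-shift-and-recurse procedure (which rescans and rebuilds the list for every rest gap) by a single left-to-right pass over consecutive pairs that maintains one cumulative offset, adding gap-300 whenever a gap exceeds 5400.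
-- outside the precondition, e.g. on adjust_time_list(-1, [0, 1]): A returns [0, 1], B returns [0]
import Mathlib
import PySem

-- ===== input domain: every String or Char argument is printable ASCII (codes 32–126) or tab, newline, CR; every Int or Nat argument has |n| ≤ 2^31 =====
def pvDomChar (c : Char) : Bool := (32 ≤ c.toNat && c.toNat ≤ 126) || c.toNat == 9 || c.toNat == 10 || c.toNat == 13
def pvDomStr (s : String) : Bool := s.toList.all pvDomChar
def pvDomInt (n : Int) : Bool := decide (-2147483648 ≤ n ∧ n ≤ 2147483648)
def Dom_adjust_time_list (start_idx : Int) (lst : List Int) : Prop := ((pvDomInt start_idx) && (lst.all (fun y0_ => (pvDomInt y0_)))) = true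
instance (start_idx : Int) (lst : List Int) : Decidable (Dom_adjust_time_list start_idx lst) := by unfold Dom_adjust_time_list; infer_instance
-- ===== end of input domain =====

-- B replaces A's recursive find-gap/slice/shift/recurse rescans by one linear pass with a
-- cumulative offset (gap > 5400 shrinks to 300); measured asymptotically faster (O(n) vs O(n^2)).


-- ===== PORT A =====
-- length bookkeeping needed by the port's own termination argument
theorem pvSliceSplitLen (xs : List Int) (i : Int) :
    (PySem.List.slice xs none (some i)).length + (PySem.List.slice xs (some i) none).length = xs.length := by
  simp [PySem.List.slice, PySem.List.clampIdx]
  omega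

def adjust_time_list (start_idx : Int) (lst : List Int) : List Int :=
  -- for i in range(start_idx+1, len(lst)): if gap > 5400: break  →  find? on the range
  match h : (PySem.List.pyRange (start_idx + 1) (lst.length : Int) 1).find?
      (fun i => decide (5400 < PySem.List.pyGetD lst i 0 - PySem.List.pyGetD lst (i - 1) 0)) with
  | none => lst
  | some nsi =>
      adjust_time_list nsi
        (PySem.List.slice lst none (some nsi) ++
          ((PySem.List.slice lst (some nsi) none).map
              (fun time => time - PySem.List.pyGetD lst nsi 0)).map
            (fun time => time + 300 + PySem.List.pyGetD lst (nsi - 1) 0))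
termination_by ((lst.length : Int) - (start_idx + 1)).toNat
decreasing_by
  have hm := List.mem_of_find?_eq_some h
  rw [PySem.List.mem_pyRange_one] at hm
  have hlen := pvSliceSplitLen lst nsi
  simp only [List.length_append, List.length_map]
  omega

-- ===== PORT B =====
def adjust_time_list_alt (start_idx : Int) (lst : List Int) : List Int :=
  let k := start_idx + 1
  (((PySem.List.slice lst (some (k - 1)) none).zip (PySem.List.slice lst (some k) none)).foldl
      (fun acc pc =>
        let offset := if 5400 < pc.2 - pc.1 then acc.2 + (pc.2 - pc.1 - 300) else acc.2
        (acc.1 ++ [pc.2 - offset], offset))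
      (PySem.List.slice lst none (some k), 0)).1

-- ===== PRECONDITION & SPEC =====
-- Pre_ excludes negative start_idx: there A indexes lst[i] with negative i, so it either raises
-- IndexError or silently compares wrapped-around elements (an artefact of Python negative indexing).
def Pre_adjust_time_list (start_idx : Int) (lst : List Int) : Prop := 0 ≤ start_idx
instance (start_idx : Int) (lst : List Int) : Decidable (Pre_adjust_time_list start_idx lst) := by
  unfold Pre_adjust_time_list; infer_instance

def pvWitness_adjust_time_list : Int × List Int := (0, [0, 10000, 10300])

def Spec_adjust_time_list (start_idx : Int) (lst : List Int) (out : List Int) : Prop := out = adjust_time_list_alt start_idx lst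
instance (start_idx : Int) (lst : List Int) (out : List Int) : Decidable (Spec_adjust_time_list start_idx lst out) := by unfold Spec_adjust_time_list; infer_instance

-- ===== CLAIM (what is proved, stated in full; the proofs are below) =====
def Claim_equal_adjust_time_list : Prop := ∀ (start_idx : Int) (lst : List Int), Dom_adjust_time_list start_idx lst → Pre_adjust_time_list start_idx lst → Spec_adjust_time_list start_idx lst (adjust_time_list start_idx lst)

-- ===== LEMMAS AND PROOFS =====

-- the one-pass adjustment both programs compute: prev element, running offset
def pvGo (prev offset : Int) : List Int → List Int
  | [] => []
  | c :: t =>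
      (c - (if 5400 < c - prev then offset + (c - prev - 300) else offset)) ::
        pvGo c (if 5400 < c - prev then offset + (c - prev - 300) else offset) t

-- common characterisation of both ports
def pvChi (s : Int) (lst : List Int) : List Int :=
  lst.take (s.toNat + 1) ++
    (match lst.drop s.toNat with
     | [] => []
     | p :: t => pvGo p 0 t)

theorem pvFoldZip : ∀ (t : List Int) (p off : Int) (acc : List Int),
    (((p :: t).zip t).foldl
      (fun acc pc =>
        let offset := if 5400 < pc.2 - pc.1 then acc.2 + (pc.2 - pc.1 - 300) else acc.2
        (acc.1 ++ [pc.2 - offset], offset))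
      (acc, off)).1 = acc ++ pvGo p off t := by
  intro t
  induction t with
  | nil => intro p off acc; simp [pvGo]
  | cons c t' ih =>
    intro p off acc
    simp only [List.zip_cons_cons, List.foldl_cons, pvGo]
    rw [ih]
    simp

theorem pvGo_shift : ∀ (rest : List Int) (p off c : Int),
    pvGo (p - c) off (rest.map (· - c)) = pvGo p (off + c) rest := by
  intro rest
  induction rest with
  | nil => intro p off c; rfl
  | cons r rs ih =>
    intro p off c
    simp only [List.map_cons, pvGo]
    rw [show r - c - (p - c) = r - p from by ring]
    split_ifs with hc
    · congr 1
      · ring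
      · have h2 := ih r (off + (r - p - 300)) c
        rw [show off + (r - p - 300) + c = off + c + (r - p - 300) from by ring] at h2
        exact h2
    · congr 1
      · ring
      · exact ih r off c

theorem pvGo_small : ∀ (seg : List Int) (p : Int) (rest : List Int),
    List.IsChain (fun a b => b - a ≤ 5400) (p :: seg) →
    pvGo p 0 (seg ++ rest) = seg ++ pvGo ((p :: seg).getLast (by simp)) 0 rest := by
  intro seg
  induction seg with
  | nil => intro p rest _; simp [List.getLast]
  | cons q seg' ih =>
    intro p rest hch
    rw [List.isChain_cons_cons] at hch
    simp only [List.cons_append, pvGo]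
    rw [if_neg (by omega), List.getLast_cons (by simp)]
    congr 1
    · omega
    · simpa using ih q rest hch.2

theorem pvChain (lst : List Int) (d e : Nat) (he : e ≤ lst.length)
    (h : ∀ i : Nat, d < i → i < e → (lst[i]?.getD 0) - (lst[i-1]?.getD 0) ≤ 5400) :
    List.IsChain (fun a b => b - a ≤ 5400) ((lst.drop d).take (e - d)) := by
  rw [List.isChain_iff_getElem]
  intro i hi
  simp only [List.length_take, List.length_drop] at hi
  have hgi : ∀ (j : Nat) (hj : j + 1 ≤ e - d), ((lst.drop d).take (e - d))[j]'(by simp; omega) = lst[d + j]'(by omega) := by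
    intro j hj
    rw [List.getElem_take, List.getElem_drop]
  rw [hgi i (by omega), hgi (i+1) (by omega)]
  have := h (d + i + 1) (by omega) (by omega)
  rw [List.getElem?_eq_getElem (by omega), List.getElem?_eq_getElem (by omega)] at this
  simpa [show d + i + 1 - 1 = d + i from by omega, show d + (i+1) = d + i + 1 from by omega] using this

theorem pvFindFirstAux {P : Int → Bool} : ∀ (n : Nat) (a b x : Int), (b - a).toNat ≤ n →
    (PySem.List.pyRange a b 1).find? P = some x →
    a ≤ x ∧ x < b ∧ P x = true ∧ ∀ i, a ≤ i → i < x → P i = false := by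
  intro n
  induction n with
  | zero =>
    intro a b x hn h
    rw [PySem.List.pyRange_one_eq_nil (by omega)] at h
    simp at h
  | succ n ih =>
    intro a b x hn h
    by_cases hab : a < b
    · rw [PySem.List.pyRange_one_cons hab] at h
      cases hPa : P a with
      | true =>
        rw [List.find?_cons_of_pos (h := hPa)] at h
        obtain rfl : a = x := by simpa using h
        exact ⟨le_rfl, hab, hPa, fun i h1 h2 => absurd h2 (by omega)⟩
      | false =>
        rw [List.find?_cons_of_neg (h := by simp [hPa])] at h
        obtain ⟨h1, h2, h3, h4⟩ := ih (a + 1) b x (by omega) h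
        refine ⟨by omega, h2, h3, fun i hi1 hi2 => ?_⟩
        rcases eq_or_lt_of_le hi1 with rfl | hlt
        · exact hPa
        · exact h4 i (by omega) hi2
    · rw [PySem.List.pyRange_one_eq_nil (by omega)] at h
      simp at h

theorem pvFindFirst {P : Int → Bool} (a b x : Int)
    (h : (PySem.List.pyRange a b 1).find? P = some x) :
    a ≤ x ∧ x < b ∧ P x = true ∧ ∀ i, a ≤ i → i < x → P i = false :=
  pvFindFirstAux (b - a).toNat a b x le_rfl h

theorem pvAltChi (s : Int) (lst : List Int) (hs : 0 ≤ s) :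
    adjust_time_list_alt s lst = pvChi s lst := by
  unfold adjust_time_list_alt pvChi
  dsimp only
  rw [show s + 1 - 1 = s from by ring]
  rw [PySem.List.slice_from lst hs, PySem.List.slice_to lst (by omega : (0:Int) ≤ s + 1),
      PySem.List.slice_from lst (by omega : (0:Int) ≤ s + 1)]
  rw [show (s + 1).toNat = s.toNat + 1 from by omega]
  cases h : lst.drop s.toNat with
  | nil =>
    have h2 : lst.drop (s.toNat + 1) = [] := by
      rw [List.drop_eq_nil_iff] at h ⊢; omega
    rw [h2]
    simp
  | cons p t =>
    have h2 : lst.drop (s.toNat + 1) = t := by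
      rw [← List.drop_drop, h]; rfl
    rw [h2]
    exact pvFoldZip t p 0 _

theorem pvChiNone (s : Int) (lst : List Int) (hs : 0 ≤ s)
    (h : (PySem.List.pyRange (s + 1) (lst.length : Int) 1).find?
      (fun i => decide (5400 < PySem.List.pyGetD lst i 0 - PySem.List.pyGetD lst (i - 1) 0)) = none) :
    pvChi s lst = lst := by
  have hall := List.find?_eq_none.mp h
  unfold pvChi
  cases h' : lst.drop s.toNat with
  | nil =>
    rw [List.drop_eq_nil_iff] at h'
    rw [List.take_of_length_le (by omega)]
    simp
  | cons p t =>
    have hd : s.toNat < lst.length := by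
      rcases Nat.lt_or_ge s.toNat lst.length with hlt | hge
      · exact hlt
      · rw [List.drop_eq_nil_iff.mpr hge] at h'; cases h'
    have hch : List.IsChain (fun a b => b - a ≤ 5400) (p :: t) := by
      have := pvChain lst s.toNat lst.length le_rfl (fun i hi1 hi2 => by
        have hm : ((i : Int)) ∈ PySem.List.pyRange (s + 1) (lst.length : Int) 1 := by
          rw [PySem.List.mem_pyRange_one]; omega
        have hfalse := hall _ hm
        simp only [decide_eq_true_eq] at hfalse
        have e1 : PySem.List.pyGetD lst (i : Int) 0 = lst[i]?.getD 0 := by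
          rw [PySem.List.pyGetD_natCast]; rfl
        have e2 : PySem.List.pyGetD lst ((i : Int) - 1) 0 = lst[i-1]?.getD 0 := by
          rw [show ((i : Int) - 1) = ((i - 1 : Nat) : Int) from by omega, PySem.List.pyGetD_natCast]; rfl
        rw [e1, e2] at hfalse
        omega)
      rwa [show lst.length - s.toNat = (lst.drop s.toNat).length from by simp, List.take_length, h'] at this
    have hid := pvGo_small t p [] hch
    simp only [List.append_nil] at hid
    dsimp only
    rw [hid]
    simp only [pvGo, List.append_nil]
    have h2 : lst.drop (s.toNat + 1) = t := by
      rw [← List.drop_drop, h']; rfl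
    rw [← h2, List.take_append_drop]

theorem pvChiStep (lst : List Int) (d m : Nat) (hdm : d + 1 ≤ m) (hm : m < lst.length)
    (hgap : 5400 < lst[m]'hm - lst[m-1]'(by omega))
    (hsm : ∀ i : Nat, d < i → i < m → (lst[i]?.getD 0) - (lst[i-1]?.getD 0) ≤ 5400) :
    pvChi (m : Int) (lst.take m ++ (lst.drop m).map (fun x => x - (lst[m]'hm - lst[m-1]'(by omega) - 300)))
      = pvChi (d : Int) lst := by
  have hL1 : (lst.take m).length = m := List.length_take_of_le (by omega)
  have hdc : lst.drop m = lst[m]'hm :: lst.drop (m+1) := List.drop_eq_getElem_cons hm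
  -- LHS
  unfold pvChi
  dsimp only [Int.toNat_natCast]
  rw [List.drop_left' hL1, List.take_append, List.take_take,
      show min (m+1) m = m from by omega, hdc, List.map_cons, hL1,
      show m + 1 - m = 1 from by omega]
  dsimp only
  rw [pvGo_shift, zero_add]
  -- RHS: split the d-tail at m
  have hdl : d < lst.length := by omega
  have hddc : lst.drop d = lst[d]'hdl :: lst.drop (d+1) := List.drop_eq_getElem_cons hdl
  rw [hddc]
  dsimp only
  have hsplit : lst.drop (d+1) = (lst.drop (d+1)).take (m - (d+1)) ++ lst.drop m := by
    conv_lhs => rw [← List.take_append_drop (m - (d+1)) (lst.drop (d+1))]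
    rw [List.drop_drop, show d + 1 + (m - (d+1)) = m from by omega]
  have hcons : (lst.drop d).take (m - d) = lst[d]'hdl :: (lst.drop (d+1)).take (m - (d+1)) := by
    rw [hddc, show m - d = (m - (d+1)) + 1 from by omega, List.take_succ_cons]
  have hchain : List.IsChain (fun a b => b - a ≤ 5400)
      (lst[d]'hdl :: (lst.drop (d+1)).take (m - (d+1))) := by
    have := pvChain lst d m (by omega) hsm
    rwa [hcons] at this
  have hlast : (lst[d]'hdl :: (lst.drop (d+1)).take (m - (d+1))).getLast (by simp) = lst[m-1]'(by omega) := by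
    have hlen : (lst[d]'hdl :: (lst.drop (d+1)).take (m - (d+1))).length = m - d := by
      simp only [List.length_cons, List.length_take, List.length_drop]
      omega
    rw [List.getLast_eq_getElem]
    simp only [hlen]
    rw [List.getElem_of_eq hcons.symm, List.getElem_take, List.getElem_drop]
    simp only [show d + (m - d - 1) = m - 1 from by omega]
  rw [hsplit, pvGo_small _ _ _ hchain, hlast, hdc]
  simp only [pvGo]
  rw [if_pos hgap, zero_add]
  rw [← List.append_assoc]
  have htake : lst.take (d+1) ++ (lst.drop (d+1)).take (m - (d+1)) = lst.take m := by
    rw [← List.take_add, show d + 1 + (m - (d+1)) = m from by omega]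
  rw [htake]
  simp [List.append_assoc]

theorem pvAChi : ∀ (n : Nat) (s : Int) (lst : List Int), 0 ≤ s →
    ((lst.length : Int) - (s + 1)).toNat ≤ n → adjust_time_list s lst = pvChi s lst := by
  intro n
  induction n with
  | zero =>
    intro s lst hs hn
    unfold adjust_time_list
    split
    · rename_i heq
      exact (pvChiNone s lst hs heq).symm
    · rename_i nsi heq
      obtain ⟨h1, h2, _, _⟩ := pvFindFirst _ _ _ heq
      omega
  | succ n ih =>
    intro s lst hs hn
    unfold adjust_time_list
    split
    · rename_i heq
      exact (pvChiNone s lst hs heq).symm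
    · rename_i nsi heq
      obtain ⟨h1, h2, h3, h4⟩ := pvFindFirst _ _ _ heq
      have hs' : (0:Int) ≤ nsi := by omega
      have hdm : s.toNat + 1 ≤ nsi.toNat := by omega
      have hml : nsi.toNat < lst.length := by omega
      -- rewrite the gap condition into getElem form
      simp only [decide_eq_true_eq] at h3
      rw [PySem.List.pyGetD_eq_getElem lst (i := nsi) 0 (by omega) (by omega),
          PySem.List.pyGetD_eq_getElem lst (i := nsi - 1) 0 (by omega) (by omega)] at h3
      simp only [show (nsi - 1).toNat = nsi.toNat - 1 from by omega] at h3
      -- rewrite the new list into take/drop/map form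
      rw [PySem.List.slice_to lst hs', PySem.List.slice_from lst hs',
          PySem.List.pyGetD_eq_getElem lst (i := nsi) 0 (by omega) (by omega),
          PySem.List.pyGetD_eq_getElem lst (i := nsi - 1) 0 (by omega) (by omega)]
      simp only [show (nsi - 1).toNat = nsi.toNat - 1 from by omega]
      rw [List.map_map]
      have hmap : ((fun time => time + 300 + lst[nsi.toNat - 1]'(by omega)) ∘
            (fun time => time - lst[nsi.toNat]'(by omega))) =
          (fun x => x - (lst[nsi.toNat]'(by omega) - lst[nsi.toNat - 1]'(by omega) - 300)) := by
        funext x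
        simp only [Function.comp]
        ring
      rw [hmap]
      -- recurse via ih, then apply the step lemma
      have hlenL : (lst.take nsi.toNat ++ (lst.drop nsi.toNat).map
          (fun x => x - (lst[nsi.toNat]'(by omega) - lst[nsi.toNat - 1]'(by omega) - 300))).length
          = lst.length := by
        simp only [List.length_append, List.length_take, List.length_map, List.length_drop]
        omega
      rw [ih nsi _ hs' (by rw [hlenL]; omega)]
      -- translate the first-false facts for pvChiStep
      have hsm : ∀ i : Nat, s.toNat < i → i < nsi.toNat →
          (lst[i]?.getD 0) - (lst[i-1]?.getD 0) ≤ 5400 := by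
        intro i hi1 hi2
        have hfalse : ¬ (5400 < PySem.List.pyGetD lst (i : Int) 0 - PySem.List.pyGetD lst ((i : Int) - 1) 0) := by
          simpa using h4 (i : Int) (by omega) (by omega)
        have e1 : PySem.List.pyGetD lst (i : Int) 0 = lst[i]?.getD 0 := by
          rw [PySem.List.pyGetD_natCast]; rfl
        have e2 : PySem.List.pyGetD lst ((i : Int) - 1) 0 = lst[i-1]?.getD 0 := by
          rw [show ((i : Int) - 1) = ((i - 1 : Nat) : Int) from by omega, PySem.List.pyGetD_natCast]; rfl
        rw [e1, e2] at hfalse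
        omega
      have hstep := pvChiStep lst s.toNat nsi.toNat hdm hml h3 hsm
      rw [show ((nsi.toNat : Int)) = nsi from by omega, show ((s.toNat : Int)) = s from by omega] at hstep
      exact hstep

-- ===== VERDICT (by name: the statement is the Claim_ definition above) =====
theorem adjust_time_list_spec : Claim_equal_adjust_time_list := by
  intro s lst _ hpre
  unfold Spec_adjust_time_list
  rw [pvAChi (((lst.length : Int) - (s + 1)).toNat) s lst hpre le_rfl, pvAltChi s lst hpre]
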